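-- pv_equiv track=rewrite | github.com/dkkim0122/baekjoon | programmers/모의고사.py | solution
-- ===== SOURCE A (Python) =====
-- def solution(answers):
--     def check_ans(student, answers):
--         correct = 0
--         for i in range(len(answers)):
--             if answers[i] == student[i % len(student)]:
--                 correct += 1
--
--         return correct
--
--     student1 = [1,2,3,4,5]
--     student2 = [2,1,2,3,2,4,2,5]
--     student3 = [3,3,1,1,2,2,4,4,5,5]
--     scores = [0] * 3
--     result = []
--
--     for i, answer in enumerate(answers):
--         if answer == student1[i % len(student1)]:
--             scores[0] += 1
--         if answer == student2[i % len(student2)]: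
--             scores[1] += 1
--         if answer == student3[i % len(student3)]:
--             scores[2] += 1
--
--     for i, score in enumerate(scores):
--         if score == max(scores):
--             result.append(i+1)
--
--     return result
-- ===== SOURCE B (Python) =====
-- def solution(answers):
--     patterns = [[1, 2, 3, 4, 5],
--                 [2, 1, 2, 3, 2, 4, 2, 5],
--                 [3, 3, 1, 1, 2, 2, 4, 4, 5, 5]]
--     # One pattern-independent pass: tally answers by their position in the
--     # combined cycle of length 40 = lcm(5, 8, 10).
--     keys = [(i % 40, a) for i, a in enumerate(answers)]
--     freq = {}
--     for k in keys:
--         freq[k] = freq.get(k, 0) + 1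
--     # Each score is 40 table lookups, no further scan of answers.
--     scores = [sum(freq.get((j, p[j % len(p)]), 0) for j in range(40))
--               for p in patterns]
--     m = max(scores)
--     return [i + 1 for i, s in enumerate(scores) if s == m]
-- ===== Notes on version B (the rewrite author's own statement) =====
-- stated objective: alternative
-- what changed: B replaces A's per-element comparison against the three cyclic patterns by a frequency table keyed by (index mod 40, answer) over the lcm-40 combined cycle, built in one pattern-independent pass; each score is then 40 dictionary lookups instead of a per-pattern scan of answers.
import Mathlib
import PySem

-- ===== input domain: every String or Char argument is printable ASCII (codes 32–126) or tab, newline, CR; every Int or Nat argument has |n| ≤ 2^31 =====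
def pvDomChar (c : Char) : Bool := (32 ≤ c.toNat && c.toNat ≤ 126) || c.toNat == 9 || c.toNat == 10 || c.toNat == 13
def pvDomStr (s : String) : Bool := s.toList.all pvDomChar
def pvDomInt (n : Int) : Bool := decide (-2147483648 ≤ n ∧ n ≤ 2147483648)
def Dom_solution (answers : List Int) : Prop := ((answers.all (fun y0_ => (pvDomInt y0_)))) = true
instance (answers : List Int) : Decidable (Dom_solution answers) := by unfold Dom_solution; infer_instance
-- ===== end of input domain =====

-- B replaces A's per-element comparison against the three cyclic patterns by a frequency table keyed by
-- (index mod 40, answer) over the lcm-40 combined cycle, built in one pattern-independent pass; each score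
-- is then 40 table lookups (alternative data structure; same asymptotic cost).

-- ===== PORT A =====
-- one step of A's 'for i, answer in enumerate(answers)' loop, updating the three mutable counters
def stepA (s : Int × Int × Int) (pr : Int × Int) : Int × Int × Int :=
  let s := if pr.2 = PySem.List.pyGetD ([1,2,3,4,5] : List Int) (PySem.Int.mod pr.1 (([1,2,3,4,5] : List Int).length : Int)) 0 then (s.1 + 1, s.2.1, s.2.2) else s
  let s := if pr.2 = PySem.List.pyGetD ([2,1,2,3,2,4,2,5] : List Int) (PySem.Int.mod pr.1 (([2,1,2,3,2,4,2,5] : List Int).length : Int)) 0 then (s.1, s.2.1 + 1, s.2.2) else s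
  if pr.2 = PySem.List.pyGetD ([3,3,1,1,2,2,4,4,5,5] : List Int) (PySem.Int.mod pr.1 (([3,3,1,1,2,2,4,4,5,5] : List Int).length : Int)) 0 then (s.1, s.2.1, s.2.2 + 1) else s

def solution (answers : List Int) : List Int :=
  let scores := (PySem.List.enumerate answers).foldl stepA (0, 0, 0)
  let scoresL : List Int := [scores.1, scores.2.1, scores.2.2]
  (PySem.List.enumerate scoresL).foldl
    (fun r pr => if pr.2 = (PySem.List.max? scoresL (fun y => y)).getD 0 then r ++ [pr.1 + 1] else r) []

-- ===== PORT B =====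
def solution_alt (answers : List Int) : List Int :=
  let patterns : List (List Int) := [[1,2,3,4,5], [2,1,2,3,2,4,2,5], [3,3,1,1,2,2,4,4,5,5]]
  let keys := (PySem.List.enumerate answers).map (fun pr => (PySem.Int.mod pr.1 40, pr.2))
  let freq := keys.foldl (fun d k => d.insert k (d.getD k 0 + 1)) (PySem.Dict.empty : PySem.Dict (Int × Int) Int)
  let scores := patterns.map (fun p =>
    ((PySem.List.pyRange 0 40 1).map (fun j =>
      freq.getD (j, PySem.List.pyGetD p (PySem.Int.mod j (p.length : Int)) 0) 0)).sum)
  let m := (PySem.List.max? scores (fun y => y)).getD 0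
  (PySem.List.enumerate scores).foldl (fun r pr => if pr.2 = m then r ++ [pr.1 + 1] else r) []

-- ===== PRECONDITION & SPEC =====
def Spec_solution (answers : List Int) (out : List Int) : Prop := out = solution_alt answers
instance (answers : List Int) (out : List Int) : Decidable (Spec_solution answers out) := by unfold Spec_solution; infer_instance

-- ===== CLAIM (what is proved, stated in full; the proofs are below) =====
def Claim_equal_solution : Prop := ∀ (answers : List Int), Dom_solution answers → Spec_solution answers (solution answers)

-- ===== LEMMAS AND PROOFS =====

-- the count of matches of pattern p against answers starting at index s (what A accumulates per pattern)
def cntP (p : List Int) (answers : List Int) (s : Int) : Int :=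
  ((PySem.List.enumerate answers s).map (fun pr =>
    if pr.2 = PySem.List.pyGetD p (PySem.Int.mod pr.1 (p.length : Int)) 0 then (1 : Int) else 0)).sum

-- A's interleaved fold computes the three independent counts
lemma foldA_eq_counts (answers : List Int) (s a b c : Int) :
    (PySem.List.enumerate answers s).foldl stepA (a, b, c) =
      (a + cntP [1,2,3,4,5] answers s,
       b + cntP [2,1,2,3,2,4,2,5] answers s,
       c + cntP [3,3,1,1,2,2,4,4,5,5] answers s) := by
  induction answers generalizing s a b c with
  | nil => simp [cntP, PySem.List.enumerate_nil]
  | cons x xs ih =>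
    simp only [PySem.List.enumerate_cons, List.foldl_cons, cntP, List.map_cons, List.sum_cons, stepA]
    split_ifs <;> simp only [ih, cntP, Prod.mk.injEq] <;> refine ⟨by ring, by ring, by ring⟩

-- summing a point-indicator over a duplicate-free index list containing r picks out the single term at r
lemma sum_indicator (ks : List Int) (f : Int → Int) (r x : Int)
    (hmem : r ∈ ks) (hnd : ks.Nodup) :
    (ks.map (fun j => if ((r, x) : Int × Int) = (j, f j) then (1 : Int) else 0)).sum
      = if x = f r then 1 else 0 := by
  induction ks with
  | nil => simp at hmem
  | cons k t ih =>
    simp only [List.map_cons, List.sum_cons]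
    rcases List.mem_cons.mp hmem with h | h
    · have hknot : r ∉ t := by rw [h]; exact (List.nodup_cons.mp hnd).1
      have hz : (t.map (fun j => if ((r, x) : Int × Int) = (j, f j) then (1 : Int) else 0)).sum = 0 := by
        rw [List.sum_eq_zero]
        intro y hy
        obtain ⟨j, hj, rfl⟩ := List.mem_map.mp hy
        have hne : r ≠ j := fun he => hknot (he ▸ hj)
        simp [Prod.ext_iff, hne]
      rw [hz, add_zero, ← h]
      by_cases hx : x = f r
      · simp [hx]
      · have hne : ((r, x) : Int × Int) ≠ (r, f r) := by simp [Prod.ext_iff, hx]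
        simp [hne, hx]
    · have hk : r ≠ k := fun he => (List.nodup_cons.mp hnd).1 (he ▸ h)
      have hne : ((r, x) : Int × Int) ≠ (k, f k) := by simp [Prod.ext_iff, hk]
      rw [if_neg hne, zero_add, ih h (List.nodup_cons.mp hnd).2]

-- summing the (i mod 40, answer)-counts over the 40 cycle positions recovers the direct match count
lemma sum_counts_eq_cnt (p : List Int)
    (hL : ∀ s : Int, PySem.Int.mod (PySem.Int.mod s 40) (p.length : Int) = PySem.Int.mod s (p.length : Int)) :
    ∀ (answers : List Int) (s : Int),
    ((PySem.List.pyRange 0 40 1).map (fun j =>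
        ((((PySem.List.enumerate answers s).map (fun pr => (PySem.Int.mod pr.1 40, pr.2))).count
            ((j, PySem.List.pyGetD p (PySem.Int.mod j (p.length : Int)) 0) : Int × Int) : Nat) : Int))).sum
      = cntP p answers s := by
  intro answers
  induction answers with
  | nil => intro s; simp [cntP, PySem.List.enumerate_nil]
  | cons x xs ih =>
    intro s
    simp only [PySem.List.enumerate_cons, List.map_cons, List.count_cons, cntP, List.sum_cons, beq_iff_eq]
    push_cast [Nat.cast_ite]
    rw [PySem.List.sum_map_add_int, ih (s+1)]
    have hmem : PySem.Int.mod s 40 ∈ PySem.List.pyRange 0 40 1 := by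
      rw [PySem.List.mem_pyRange_one]
      exact ⟨PySem.Int.mod_nonneg s (by norm_num), PySem.Int.mod_lt s (by norm_num)⟩
    rw [sum_indicator (PySem.List.pyRange 0 40 1)
          (fun j => PySem.List.pyGetD p (PySem.Int.mod j (p.length : Int)) 0)
          (PySem.Int.mod s 40) x hmem (PySem.List.nodup_pyRange_one 0 40)]
    rw [hL s]
    simp only [cntP]
    ring

-- i ≡ i mod 40 modulo any divisor of 40
lemma mod40_compat (L : Int) (hL : 0 < L) (hdvd : L ∣ 40) (s : Int) :
    PySem.Int.mod (PySem.Int.mod s 40) L = PySem.Int.mod s L := by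
  rw [PySem.Int.mod_eq_emod_of_pos (by norm_num : (0:Int) < 40),
      PySem.Int.mod_eq_emod_of_pos hL, PySem.Int.mod_eq_emod_of_pos hL]
  exact Int.emod_emod_of_dvd s hdvd

-- B's dictionary-based score for pattern p equals A's direct match count
lemma score_eq (p : List Int)
    (hp : ∀ s : Int, PySem.Int.mod (PySem.Int.mod s 40) (p.length : Int) = PySem.Int.mod s (p.length : Int))
    (answers : List Int) :
    ((PySem.List.pyRange 0 40 1).map (fun j =>
        ((((PySem.List.enumerate answers).map (fun pr => (PySem.Int.mod pr.1 40, pr.2))).foldl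
            (fun d k => d.insert k (d.getD k 0 + 1)) (PySem.Dict.empty : PySem.Dict (Int × Int) Int)).getD
          ((j, PySem.List.pyGetD p (PySem.Int.mod j (p.length : Int)) 0) : Int × Int) 0))).sum
      = cntP p answers 0 := by
  have hgetD : ∀ j : Int,
      ((((PySem.List.enumerate answers).map (fun pr => (PySem.Int.mod pr.1 40, pr.2))).foldl
          (fun d k => d.insert k (d.getD k 0 + 1)) (PySem.Dict.empty : PySem.Dict (Int × Int) Int)).getD
        ((j, PySem.List.pyGetD p (PySem.Int.mod j (p.length : Int)) 0) : Int × Int) 0)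
      = ((((PySem.List.enumerate answers).map (fun pr => (PySem.Int.mod pr.1 40, pr.2))).count
          ((j, PySem.List.pyGetD p (PySem.Int.mod j (p.length : Int)) 0) : Int × Int) : Nat) : Int) := by
    intro j
    rw [PySem.Dict.getD_foldl_insert_add_one, PySem.Dict.getD_empty, zero_add]
  simp only [hgetD]
  exact sum_counts_eq_cnt p hp answers 0

-- ===== VERDICT (by name: the statement is the Claim_ definition above) =====
theorem solution_spec : Claim_equal_solution := by
  intro answers _
  unfold Spec_solution solution solution_alt
  simp only [foldA_eq_counts, zero_add, List.map_cons, List.map_nil]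
  simp only [score_eq [1,2,3,4,5] (fun s => mod40_compat 5 (by norm_num) (by norm_num) s) answers,
      score_eq [2,1,2,3,2,4,2,5] (fun s => mod40_compat 8 (by norm_num) (by norm_num) s) answers,
      score_eq [3,3,1,1,2,2,4,4,5,5] (fun s => mod40_compat 10 (by norm_num) (by norm_num) s) answers]
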